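-- pv_equiv track=rewrite | github.com/wangzizhe/GateForge | gateforge/agent_modelica_connector_flow_semantics_tool_v0_34_15.py | _shared_roots
-- ===== SOURCE A (Python) =====
-- def _shared_roots(connects: list[dict[str, str]]) -> dict[str, int]:
--     counts: dict[str, int] = {}
--     for row in connects:
--         for side in (row["left"], row["right"]):
--             root = side.split("[", 1)[0].split(".", 1)[0].strip()
--             if root:
--                 counts[root] = counts.get(root, 0) + 1
--     return {key: count for key, count in sorted(counts.items()) if count >= 3}
-- ===== SOURCE B (Python) =====
-- def _shared_roots(connects: list[dict[str, str]]) -> dict[str, int]: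
--     roots: list[str] = []
--     for row in connects:
--         for side in (row["left"], row["right"]):
--             root = side.split("[", 1)[0].split(".", 1)[0].strip()
--             if root:
--                 roots.append(root)
--     roots.sort()
--     result: dict[str, int] = {}
--     i, n = 0, len(roots)
--     while i < n:
--         j = i + 1
--         while j < n and roots[j] == roots[i]:
--             j += 1
--         if j - i >= 3:
--             result[roots[i]] = j - i
--         i = j
--     return result
-- ===== Notes on version B (the rewrite author's own statement) =====
-- stated objective: alternative
-- what changed: B replaces A's hash-map counting pass plus final sort of the counter items by a flat root list that is sorted once and then scanned with a two-pointer run-length walk, emitting each run of length >= 3 directly in sorted order.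
import Mathlib
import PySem

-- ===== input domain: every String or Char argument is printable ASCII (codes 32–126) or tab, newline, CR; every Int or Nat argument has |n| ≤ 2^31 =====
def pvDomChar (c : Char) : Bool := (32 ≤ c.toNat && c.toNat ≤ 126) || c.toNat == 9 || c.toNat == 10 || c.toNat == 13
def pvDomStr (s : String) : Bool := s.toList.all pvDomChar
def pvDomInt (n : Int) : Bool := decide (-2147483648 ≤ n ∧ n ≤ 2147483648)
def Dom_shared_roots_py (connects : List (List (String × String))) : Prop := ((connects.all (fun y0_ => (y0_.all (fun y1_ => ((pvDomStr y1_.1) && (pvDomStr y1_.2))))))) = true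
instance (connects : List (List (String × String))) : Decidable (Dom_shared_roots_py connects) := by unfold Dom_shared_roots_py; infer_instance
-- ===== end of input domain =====

-- B (port shared_roots_py_alt) sorts the flat list of roots once and scans runs with a two-pointer
-- walk instead of A's dict counting followed by sorting the counter's items (objective: alternative).

-- ===== PORT A =====
-- root = side.split("[", 1)[0].split(".", 1)[0].strip()
-- (splitMax? is `some` since the separators are nonempty, and split always returns a nonempty
-- list, so the getD/headD defaults are never taken: exact)
def pvRoot (s : String) : String :=
  PySem.Str.strip (((PySem.Str.splitMax?
    (((PySem.Str.splitMax? s "[" 1).getD []).headD "") "." 1).getD []).headD "")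

-- row["left"] / row["right"]: a missing key is a KeyError, excluded by Pre_shared_roots_py;
-- the getD default "" is never taken on admitted inputs: exact there.
-- The final dict comprehension iterates pairs with pairwise-distinct keys (items of a dict),
-- so each insertion appends a fresh key: building the association list by appending is exact.
def shared_roots_py (connects : List (List (String × String))) : List (String × Int) :=
  let counts : PySem.Dict String Int :=
    connects.foldl (fun d row =>
      [(PySem.Dict.mk row).getD "left" "", (PySem.Dict.mk row).getD "right" ""].foldl
        (fun d side =>
          let root := pvRoot side
          if root ≠ "" then d.insert root (d.getD root 0 + 1) else d) d)
      PySem.Dict.empty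
  (PySem.List.sorted2 counts.items (fun p => p.1) (fun p => p.2)).foldl
    (fun out kv => if (3 : Int) ≤ kv.2 then out ++ [kv] else out) []

-- ===== PORT B =====
-- the two-pointer while loop of Source B over the sorted list: j scans the run of elements equal to
-- roots[i] (takeWhile/dropWhile), j - i = run.length + 1, then i jumps to j (the recursive call);
-- result[roots[i]] = j - i appends a fresh strictly larger key each time: exact as a list.
def pvGroup : List String → List (String × Int)
  | [] => []
  | k :: t =>
    let run := t.takeWhile (fun x => x == k)
    let rest := t.dropWhile (fun x => x == k)
    (if (3 : Int) ≤ (run.length : Int) + 1 then [(k, (run.length : Int) + 1)] else []) ++ pvGroup rest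
termination_by l => l.length
decreasing_by
  simpa using Nat.lt_succ_of_le (List.length_dropWhile_le _ _)

def shared_roots_py_alt (connects : List (List (String × String))) : List (String × Int) :=
  let roots : List String :=
    connects.foldl (fun acc row =>
      [(PySem.Dict.mk row).getD "left" "", (PySem.Dict.mk row).getD "right" ""].foldl
        (fun acc side =>
          let root := pvRoot side
          if root ≠ "" then acc ++ [root] else acc) acc)
      []
  pvGroup (PySem.List.sorted roots (fun x => x) false)

-- ===== PRECONDITION & SPEC =====
-- Pre_ excludes exactly the rows lacking a "left" or "right" key, on which Python A raises KeyError.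
def Pre_shared_roots_py (connects : List (List (String × String))) : Prop :=
  ∀ row ∈ connects, (PySem.Dict.mk row).contains "left" = true ∧ (PySem.Dict.mk row).contains "right" = true
instance (connects : List (List (String × String))) : Decidable (Pre_shared_roots_py connects) := by
  unfold Pre_shared_roots_py; infer_instance

def pvWitness_shared_roots_py : (List (List (String × String))) :=
  [[("left", "m.a"), ("right", "n[1]")], [("left", " m "), ("right", "m.b")]]

def Spec_shared_roots_py (connects : List (List (String × String))) (out : List (String × Int)) : Prop := out = shared_roots_py_alt connects
instance (connects : List (List (String × String))) (out : List (String × Int)) : Decidable (Spec_shared_roots_py connects out) := by unfold Spec_shared_roots_py; infer_instance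

-- ===== CLAIM (what is proved, stated in full; the proofs are below) =====
def Claim_equal_shared_roots_py : Prop := ∀ (connects : List (List (String × String))), Dom_shared_roots_py connects → Pre_shared_roots_py connects → Spec_shared_roots_py connects (shared_roots_py connects)

-- ===== LEMMAS AND PROOFS =====

-- the two roots a row contributes (in order), empty ones dropped
def pvRowRoots (row : List (String × String)) : List String :=
  (([(PySem.Dict.mk row).getD "left" "", (PySem.Dict.mk row).getD "right" ""]).map pvRoot).filter
    (fun r => decide (r ≠ ""))

def pvAllRoots (connects : List (List (String × String))) : List String :=
  connects.flatMap pvRowRoots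

theorem row_fold (d : PySem.Dict String Int) (row : List (String × String)) :
    [(PySem.Dict.mk row).getD "left" "", (PySem.Dict.mk row).getD "right" ""].foldl
      (fun d side => if pvRoot side ≠ "" then d.insert (pvRoot side) (d.getD (pvRoot side) 0 + 1) else d) d
    = (pvRowRoots row).foldl (fun d x => d.insert x (d.getD x 0 + 1)) d := by
  rw [pvRowRoots]
  set a := (PySem.Dict.mk row).getD "left" ""
  set b := (PySem.Dict.mk row).getD "right" ""
  by_cases h1 : pvRoot a = "" <;> by_cases h2 : pvRoot b = "" <;>
    simp [List.foldl, h1, h2]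

theorem outer_fold (connects : List (List (String × String))) :
    ∀ d : PySem.Dict String Int,
    connects.foldl (fun d row =>
      [(PySem.Dict.mk row).getD "left" "", (PySem.Dict.mk row).getD "right" ""].foldl
        (fun d side => if pvRoot side ≠ "" then d.insert (pvRoot side) (d.getD (pvRoot side) 0 + 1) else d) d) d
    = (pvAllRoots connects).foldl (fun d x => d.insert x (d.getD x 0 + 1)) d := by
  induction connects with
  | nil => intro d; simp [pvAllRoots]
  | cons row t ih =>
    intro d
    rw [List.foldl_cons, row_fold, ih]
    simp only [pvAllRoots, List.flatMap_cons, List.foldl_append]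

theorem portA_eq (connects : List (List (String × String))) :
    shared_roots_py connects =
      (PySem.List.sorted2 (PySem.Dict.counter (pvAllRoots connects)).items
        (fun p => p.1) (fun p => p.2)).filter (fun kv => decide ((3 : Int) ≤ kv.2)) := by
  simp only [shared_roots_py]
  rw [PySem.List.foldl_append_ite_eq_filter (fun kv : String × Int => (3 : Int) ≤ kv.2)]
  rw [List.nil_append]
  congr 2
  rw [outer_fold, PySem.Dict.foldl_insert_getD_add_one_eq_counter]

theorem row_fold_b (acc : List String) (row : List (String × String)) :
    [(PySem.Dict.mk row).getD "left" "", (PySem.Dict.mk row).getD "right" ""].foldl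
      (fun acc side => if pvRoot side ≠ "" then acc ++ [pvRoot side] else acc) acc
    = acc ++ pvRowRoots row := by
  rw [pvRowRoots]
  set a := (PySem.Dict.mk row).getD "left" ""
  set b := (PySem.Dict.mk row).getD "right" ""
  by_cases h1 : pvRoot a = "" <;> by_cases h2 : pvRoot b = "" <;>
    simp [List.foldl, h1, h2]

theorem outer_fold_b (connects : List (List (String × String))) :
    ∀ acc : List String,
    connects.foldl (fun acc row =>
      [(PySem.Dict.mk row).getD "left" "", (PySem.Dict.mk row).getD "right" ""].foldl
        (fun acc side => if pvRoot side ≠ "" then acc ++ [pvRoot side] else acc) acc) acc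
    = acc ++ pvAllRoots connects := by
  induction connects with
  | nil => intro acc; simp [pvAllRoots]
  | cons row t ih =>
    intro acc
    rw [List.foldl_cons, row_fold_b, ih]
    simp [pvAllRoots]

theorem portB_eq (connects : List (List (String × String))) :
    shared_roots_py_alt connects =
      pvGroup (PySem.List.sorted (pvAllRoots connects) (fun x => x) false) := by
  simp only [shared_roots_py_alt]
  rw [outer_fold_b, List.nil_append]

theorem insertBy_congr_mem {α : Type} (b1 b2 : α → α → Bool) (x : α) (acc : List α)
    (h : ∀ y ∈ acc, b1 x y = b2 x y) :
    PySem.List.insertBy b1 x acc = PySem.List.insertBy b2 x acc := by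
  induction acc with
  | nil => rfl
  | cons y ys ih =>
    simp only [PySem.List.insertBy]
    rw [h y (by simp)]
    by_cases hb : b2 x y = true
    · simp [hb]
    · simp only [hb, if_neg, Bool.not_eq_true] at *
      simp [ih (fun z hz => h z (by simp [hz]))]

theorem foldl_insertBy_congr {α : Type} (b1 b2 : α → α → Bool) (S : List α)
    (h : ∀ x ∈ S, ∀ y ∈ S, b1 x y = b2 x y) :
    ∀ (xs acc : List α), (∀ x ∈ xs, x ∈ S) → (∀ y ∈ acc, y ∈ S) →
      xs.foldl (fun acc x => PySem.List.insertBy b1 x acc) acc =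
      xs.foldl (fun acc x => PySem.List.insertBy b2 x acc) acc := by
  intro xs
  induction xs with
  | nil => intros; rfl
  | cons x t ih =>
    intro acc hxs hacc
    simp only [List.foldl_cons]
    rw [insertBy_congr_mem b1 b2 x acc (fun y hy => h x (hxs x (by simp)) y (hacc y hy))]
    exact ih _ (fun z hz => hxs z (by simp [hz]))
      (fun y hy => by
        rcases (PySem.List.mem_insertBy b2 x y acc).mp hy with rfl | hy'
        · exact hxs y (by simp)
        · exact hacc y hy')

theorem sorted2_eq_sorted_fst (l : List (String × Int))
    (h : ∀ p ∈ l, ∀ q ∈ l, p.1 = q.1 → p = q) :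
    PySem.List.sorted2 l (fun p => p.1) (fun p => p.2) false =
      PySem.List.sorted l (fun p => p.1) false := by
  rw [PySem.List.sorted_eq_foldl_insertBy]
  simp only [PySem.List.sorted2, if_neg (by decide : ¬ (false = true))]
  apply foldl_insertBy_congr _ _ l _ l [] (fun _ hx => hx) (by simp)
  intro p hp q hq
  rcases lt_trichotomy p.1 q.1 with hlt | heq | hgt
  · simp [hlt]
  · have : p = q := h p hp q hq heq
    subst this
    simp
  · simp [hgt, not_lt_of_gt hgt]

theorem pairwise_lt_of_le_nodup {α : Type} [LinearOrder α] {l : List α}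
    (hle : l.Pairwise (· ≤ ·)) (hnd : l.Nodup) : l.Pairwise (· < ·) := by
  have := List.Pairwise.and hle hnd
  exact this.imp (fun hab => lt_of_le_of_ne hab.1 hab.2)

theorem not_pred_head_dropWhile {α : Type} (p : α → Bool) :
    ∀ (t : List α) (h : α) (r : List α), t.dropWhile p = h :: r → p h = false := by
  intro t
  induction t with
  | nil => intro h r heq; simp [List.dropWhile] at heq
  | cons a t ih =>
    intro h r heq
    by_cases hp : p a = true
    · rw [List.dropWhile_cons_of_pos hp] at heq
      exact ih _ _ heq
    · rw [List.dropWhile_cons_of_neg hp] at heq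
      obtain ⟨rfl, -⟩ := List.cons.injEq .. ▸ heq
      exact Bool.not_eq_true _ ▸ hp

theorem counter_items_sorted (xs : List String) :
    PySem.List.sorted2 (PySem.Dict.counter xs).items (fun p => p.1) (fun p => p.2) false =
      (PySem.List.sorted (PySem.Set.ofList xs) (fun k => k) false).map
        (fun k => (k, (xs.count k : Int))) := by
  rw [sorted2_eq_sorted_fst]
  · have hperm : ((PySem.List.sorted (PySem.Set.ofList xs) (fun k => k) false).map
        (fun k => (k, (xs.count k : Int)))).Perm ((PySem.Dict.counter xs).items) := by
      rw [PySem.Dict.items_counter]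
      exact (PySem.List.sorted_perm _ _ _).map _
    apply PySem.List.sorted_eq_of_perm_of_pairwise_lt _ _ _ hperm
    rw [List.pairwise_map]
    have : List.Pairwise (· < ·) (PySem.List.sorted (PySem.Set.ofList xs) (fun k => k) false) := by
      apply pairwise_lt_of_le_nodup
      · simpa using PySem.List.sorted_pairwise (PySem.Set.ofList xs) (fun k => k)
      · exact ((PySem.List.sorted_perm _ _ _).nodup_iff).mpr (PySem.Set.nodup_ofList xs)
    simpa using this
  · intro p hp q hq hpq
    rw [PySem.Dict.items_counter] at hp hq
    obtain ⟨k1, _, rfl⟩ := List.mem_map.mp hp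
    obtain ⟨k2, _, rfl⟩ := List.mem_map.mp hq
    simp only at hpq
    simp [hpq]

theorem pvGroup_spec_aux (n : Nat) : ∀ (rs : List String), rs.length ≤ n →
    List.Pairwise (· ≤ ·) rs →
    pvGroup rs =
      ((PySem.List.sorted (PySem.Set.ofList rs) (fun k => k) false).map
        (fun k => (k, (rs.count k : Int)))).filter (fun kv => decide ((3 : Int) ≤ kv.2)) := by
  induction n with
  | zero =>
    intro rs hlen _
    rw [List.length_eq_zero_iff.mp (Nat.le_zero.mp hlen)]
    simp [pvGroup]
  | succ n ihn =>
    intro rs hlen hs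
    cases rs with
    | nil => simp [pvGroup]
    | cons k t =>
      have hlen : t.length + 1 ≤ n + 1 := by simpa using hlen
      obtain ⟨hk, hst⟩ := List.pairwise_cons.mp hs
      set run := t.takeWhile (fun x => x == k) with hrun_def
      set rest := t.dropWhile (fun x => x == k) with hrest_def
      have ht : run ++ rest = t := List.takeWhile_append_dropWhile
      have hrun : ∀ x ∈ run, x = k := by
        intro x hx
        simpa using List.mem_takeWhile_imp hx
      have hrest_pw : List.Pairwise (· ≤ ·) rest := hst.sublist (List.dropWhile_sublist _)
      have hknotin : k ∉ rest := by
        intro hkin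
        cases hrest : rest with
        | nil => rw [hrest] at hkin; cases hkin
        | cons h r' =>
          have hh : h ≠ k := by
            have := not_pred_head_dropWhile (fun x => x == k) t h r' (hrest_def ▸ hrest)
            simpa using this
          have hht : h ∈ t := (List.dropWhile_sublist _).subset (by rw [← hrest_def, hrest]; simp)
          have hkh : k < h := lt_of_le_of_ne (hk h hht) (Ne.symm hh)
          rw [hrest] at hkin
          rcases List.mem_cons.mp hkin with rfl | hkr
          · exact absurd rfl hh
          · have : h ≤ k := (List.pairwise_cons.mp (hrest ▸ hrest_pw)).1 k hkr
            exact absurd (lt_of_le_of_lt this hkh) (lt_irrefl _)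
      have hcount : (k :: t).count k = run.length + 1 := by
        rw [List.count_cons_self, ← ht, List.count_append]
        rw [List.count_eq_zero.mpr hknotin]
        rw [List.count_eq_length.mpr (fun b hb => (hrun b hb).symm ▸ rfl)]
      have hrest_sub : ∀ y ∈ rest, y ∈ t := fun y hy => (List.dropWhile_sublist _).subset hy
      have hynek : ∀ y ∈ rest, y ≠ k := fun y hy h => hknotin (h ▸ hy)
      have hcount_tail : ∀ y ∈ rest, (k :: t).count y = rest.count y := by
        intro y hy
        have hyk : (y == k) = false := by simpa using hynek y hy
        rw [List.count_cons, ← ht, List.count_append,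
          List.count_eq_zero.mpr (fun hyr => (hynek y hy) (hrun y hyr))]
        simp [Ne.symm (hynek y hy)]
      have hkeys : PySem.List.sorted (PySem.Set.ofList (k :: t)) (fun x => x) false
          = k :: PySem.List.sorted (PySem.Set.ofList rest) (fun x => x) false := by
        apply PySem.List.sorted_eq_of_perm_of_pairwise_lt
        · rw [List.perm_ext_iff_of_nodup]
          · intro a
            rw [PySem.Set.mem_ofList]
            constructor
            · intro ha
              rcases List.mem_cons.mp ha with rfl | has
              · exact List.mem_cons_self
              · have : a ∈ rest := (PySem.Set.mem_ofList _ _).mp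
                  (((PySem.List.sorted_perm _ _ _).mem_iff).mp has)
                exact List.mem_cons_of_mem _ (hrest_sub a this)
            · intro ha
              rcases List.mem_cons.mp ha with rfl | hat
              · exact List.mem_cons_self
              · rw [← ht] at hat
                rcases List.mem_append.mp hat with har | harest
                · exact (hrun a har) ▸ List.mem_cons_self
                · exact List.mem_cons_of_mem _
                    (((PySem.List.sorted_perm _ _ _).mem_iff).mpr ((PySem.Set.mem_ofList _ _).mpr harest))
          · exact List.nodup_cons.mpr ⟨fun hkin => hknotin ((PySem.Set.mem_ofList _ _).mp
              (((PySem.List.sorted_perm _ _ _).mem_iff).mp hkin)),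
              ((PySem.List.sorted_perm _ _ _).nodup_iff).mpr (PySem.Set.nodup_ofList _)⟩
          · exact PySem.Set.nodup_ofList _
        · apply List.pairwise_cons.mpr
          constructor
          · intro y hy
            have hyr : y ∈ rest := (PySem.Set.mem_ofList _ _).mp
              (((PySem.List.sorted_perm _ _ _).mem_iff).mp hy)
            exact lt_of_le_of_ne (hk y (hrest_sub y hyr)) (Ne.symm (hynek y hyr))
          · apply pairwise_lt_of_le_nodup
            · simpa using PySem.List.sorted_pairwise (PySem.Set.ofList rest) (fun x => x)
            · exact ((PySem.List.sorted_perm _ _ _).nodup_iff).mpr (PySem.Set.nodup_ofList _)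
      rw [pvGroup, hkeys, ← hrun_def, ← hrest_def, List.map_cons, List.filter_cons]
      have hmap : (PySem.List.sorted (PySem.Set.ofList rest) (fun x => x) false).map
            (fun y => (y, ((k :: t).count y : Int)))
          = (PySem.List.sorted (PySem.Set.ofList rest) (fun x => x) false).map
            (fun y => (y, (rest.count y : Int))) := by
        apply List.map_congr_left
        intro y hy
        have hyr : y ∈ rest := (PySem.Set.mem_ofList _ _).mp
          (((PySem.List.sorted_perm _ _ _).mem_iff).mp hy)
        rw [hcount_tail y hyr]
      rw [hmap, ← ihn rest (le_trans (List.length_dropWhile_le _ _) (Nat.le_of_succ_le_succ hlen)) hrest_pw, hcount]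
      have hcast : (((run.length + 1 : Nat)) : Int) = (run.length : Int) + 1 := by push_cast; ring
      rw [hcast]
      by_cases h3 : (3 : Int) ≤ (run.length : Int) + 1
      · simp [h3]
      · simp [h3]

theorem pvGroup_spec (rs : List String) (hs : List.Pairwise (· ≤ ·) rs) :
    pvGroup rs =
      ((PySem.List.sorted (PySem.Set.ofList rs) (fun k => k) false).map
        (fun k => (k, (rs.count k : Int)))).filter (fun kv => decide ((3 : Int) ≤ kv.2)) :=
  pvGroup_spec_aux rs.length rs le_rfl hs

-- ===== VERDICT (by name: the statement is the Claim_ definition above) =====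
theorem shared_roots_py_spec : Claim_equal_shared_roots_py := by
  intro connects _ _
  unfold Spec_shared_roots_py
  rw [portA_eq, portB_eq, counter_items_sorted]
  have hperm : (PySem.List.sorted (pvAllRoots connects) (fun x => x) false).Perm (pvAllRoots connects) :=
    PySem.List.sorted_perm _ _ _
  rw [pvGroup_spec _ (by simpa using PySem.List.sorted_pairwise (pvAllRoots connects) (fun x => x))]
  have hof : (PySem.Set.ofList (PySem.List.sorted (pvAllRoots connects) (fun x => x) false)).Perm
      (PySem.Set.ofList (pvAllRoots connects)) := by
    rw [List.perm_ext_iff_of_nodup (PySem.Set.nodup_ofList _) (PySem.Set.nodup_ofList _)]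
    intro a
    rw [PySem.Set.mem_ofList, PySem.Set.mem_ofList]
    exact hperm.mem_iff
  rw [PySem.List.sorted_eq_sorted_of_perm _ _ (fun k => k) (fun a b h => h) hof]
  congr 1
  apply List.map_congr_left
  intro k _
  simp [hperm.count_eq]
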